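-- pv_equiv track=rewrite | github.com/tomerwolgithub/question-decomposition-to-sql | src/data_generation/qdmr_editor.py | refs_one_up
-- ===== SOURCE A (Python) =====
-- def refs_one_up(qdmr_text, start_idx, end_idx):
--     target_refs_map = {}
--     for i in range(start_idx, end_idx + 1):
--         target_refs_map["#%s" % i] = "#%s" % (i + 1)
--     new_qdmr_step = ""
--     for tok in qdmr_text.split():
--         if tok in target_refs_map.keys():
--             new_qdmr_step += "%s " % target_refs_map[tok]
--         else:
--             new_qdmr_step += "%s " % tok
--     return new_qdmr_step.strip()
-- ===== SOURCE B (Python) =====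
-- def refs_one_up(qdmr_text, start_idx, end_idx):
--     toks = qdmr_text.split()
--     for i in range(end_idx, start_idx - 1, -1):
--         old, new = '#%s' % i, '#%s' % (i + 1)
--         toks = [new if t == old else t for t in toks]
--     return ' '.join(toks)
-- ===== Notes on version B (the rewrite author's own statement) =====
-- stated objective: simpler
-- what changed: B drops A's precomputed '#i'->'#(i+1)' replacement dictionary and per-token lookup; instead it sweeps the index range downward (range(end_idx, start_idx-1, -1)) and rewrites the token list once per index, so no map is built and no later index can re-bump an already shifted token; tokens are joined with ' '.join instead of accumulate-then-strip.
import Mathlib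
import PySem

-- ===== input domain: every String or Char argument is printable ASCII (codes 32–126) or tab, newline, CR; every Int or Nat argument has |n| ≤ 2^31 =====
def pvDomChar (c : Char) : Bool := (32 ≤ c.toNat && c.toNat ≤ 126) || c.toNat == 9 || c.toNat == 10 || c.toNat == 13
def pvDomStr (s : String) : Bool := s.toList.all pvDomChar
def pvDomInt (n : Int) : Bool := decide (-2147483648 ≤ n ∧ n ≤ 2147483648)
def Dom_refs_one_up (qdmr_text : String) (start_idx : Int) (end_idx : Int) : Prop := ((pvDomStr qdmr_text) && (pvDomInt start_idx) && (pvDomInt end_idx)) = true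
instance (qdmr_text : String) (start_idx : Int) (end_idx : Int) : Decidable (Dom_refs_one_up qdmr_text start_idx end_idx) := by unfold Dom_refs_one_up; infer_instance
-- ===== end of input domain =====

-- B drops A's precomputed "#i" → "#(i+1)" replacement dictionary and per-token lookup;
-- instead it sweeps the index range downward, rewriting the token list once per index,
-- and joins with ' '.join; objective: simpler.

-- ===== PORT A =====
-- "#%s" % i  (shared formatting helper; both Pythons build this same string)
def pvKey (i : Int) : List Char := '#' :: PySem.Int.toChars i

-- target_refs_map, built over range(start_idx, end_idx + 1)
def pvMapA (start_idx end_idx : Int) : PySem.Dict (List Char) (List Char) :=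
  (PySem.List.pyRange start_idx (end_idx + 1) 1).foldl
    (fun d i => d.insert (pvKey i) (pvKey (i + 1))) PySem.Dict.empty

def refs_one_up (qdmr_text : String) (start_idx : Int) (end_idx : Int) : String :=
  let m := pvMapA start_idx end_idx
  let step := (PySem.Chars.split₀ qdmr_text.toList).foldl
    (fun acc tok =>
      if m.contains tok then acc ++ m.getD tok [] ++ [' '] else acc ++ tok ++ [' ']) []
  String.ofList (PySem.Chars.strip step)

-- ===== PORT B =====
-- for i in range(end_idx, start_idx - 1, -1): toks = [new if t == old else t for t in toks]
def refs_one_up_alt (qdmr_text : String) (start_idx : Int) (end_idx : Int) : String :=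
  let toks := (PySem.List.pyRange end_idx (start_idx - 1) (-1)).foldl
    (fun ts i => ts.map (fun t => if t = pvKey i then pvKey (i + 1) else t))
    (PySem.Chars.split₀ qdmr_text.toList)
  String.ofList (PySem.Chars.join [' '] toks)

-- ===== PRECONDITION & SPEC =====
def Spec_refs_one_up (qdmr_text : String) (start_idx : Int) (end_idx : Int) (out : String) : Prop := out = refs_one_up_alt qdmr_text start_idx end_idx
instance (qdmr_text : String) (start_idx : Int) (end_idx : Int) (out : String) : Decidable (Spec_refs_one_up qdmr_text start_idx end_idx out) := by unfold Spec_refs_one_up; infer_instance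

-- ===== CLAIM =====
def Claim_equal_refs_one_up : Prop := ∀ (qdmr_text : String) (start_idx : Int) (end_idx : Int), Dom_refs_one_up qdmr_text start_idx end_idx → Spec_refs_one_up qdmr_text start_idx end_idx (refs_one_up qdmr_text start_idx end_idx)

-- ===== LEMMAS AND PROOFS =====

theorem pv_digitChar_bounds (d : Nat) (h : d < 10) :
    '0' ≤ Nat.digitChar d ∧ Nat.digitChar d ≤ '9' := by
  interval_cases d <;> decide

theorem pv_digitChar_toNat (d : Nat) (h : d < 10) : (Nat.digitChar d).toNat = 48 + d := by
  interval_cases d <;> decide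

theorem pv_toDigits_digits (n : Nat) : ∀ c ∈ Nat.toDigits 10 n, '0' ≤ c ∧ c ≤ '9' := by
  induction n using Nat.strong_induction_on with
  | _ n ih =>
    by_cases h : n < 10
    · rw [Nat.toDigits_of_lt_base h]
      intro c hc
      simp at hc
      subst hc
      exact pv_digitChar_bounds n h
    · rw [Nat.toDigits_of_base_le (by norm_num) (by omega)]
      intro c hc
      rcases List.mem_append.mp hc with h' | h'
      · exact ih (n / 10) (by omega) c h'
      · simp at h'
        subst h'
        exact pv_digitChar_bounds _ (Nat.mod_lt _ (by norm_num))

theorem pv_toDigits_ne_nil (n : Nat) : Nat.toDigits 10 n ≠ [] := by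
  by_cases h : n < 10
  · rw [Nat.toDigits_of_lt_base h]; simp
  · rw [Nat.toDigits_of_base_le (by norm_num) (by omega)]; simp

def pvValN (ds : List Char) : Nat := ds.foldl (fun n c => n * 10 + (c.toNat - 48)) 0

theorem pv_valN_toDigits (n : Nat) : pvValN (Nat.toDigits 10 n) = n := by
  induction n using Nat.strong_induction_on with
  | _ n ih =>
    by_cases hlt : n < 10
    · rw [Nat.toDigits_of_lt_base hlt]
      simp [pvValN, pv_digitChar_toNat n hlt]
    · rw [Nat.toDigits_of_base_le (by norm_num) (by omega)]
      have := ih (n / 10) (by omega)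
      simp only [pvValN, List.foldl_append] at *
      rw [this, List.foldl_cons, List.foldl_nil,
        pv_digitChar_toNat _ (Nat.mod_lt _ (by norm_num))]
      omega

theorem pv_toDigits_inj {m n : Nat} (h : Nat.toDigits 10 m = Nat.toDigits 10 n) : m = n := by
  have := pv_valN_toDigits m
  rw [h, pv_valN_toDigits] at this
  omega

theorem pv_key_inj {i k : Int} (h : pvKey i = pvKey k) : i = k := by
  have h' : PySem.Int.toChars i = PySem.Int.toChars k := by
    simpa [pvKey] using h
  unfold PySem.Int.toChars at h'
  by_cases hi : i < 0 <;> by_cases hk : k < 0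
  · rw [if_pos hi, if_pos hk] at h'
    injection h' with _ h2
    have := pv_toDigits_inj h2
    omega
  · rw [if_pos hi, if_neg hk] at h'
    have hd := pv_toDigits_digits k.toNat
    obtain ⟨c, cs, hc⟩ := List.exists_cons_of_ne_nil (pv_toDigits_ne_nil k.toNat)
    rw [hc] at h' hd
    have h48 : 48 ≤ c.toNat := by
      simpa [Char.le_def] using (hd c (by simp)).1
    injection h' with h1 _
    subst h1
    simp at h48
  · rw [if_neg hi, if_pos hk] at h'
    have hd := pv_toDigits_digits i.toNat
    obtain ⟨c, cs, hc⟩ := List.exists_cons_of_ne_nil (pv_toDigits_ne_nil i.toNat)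
    rw [hc] at h' hd
    have h48 : 48 ≤ c.toNat := by
      simpa [Char.le_def] using (hd c (by simp)).1
    injection h' with h1 _
    subst h1
    simp at h48
  · rw [if_neg hi, if_neg hk] at h'
    have := pv_toDigits_inj h'
    omega

theorem pv_map_get? (l : List Int) (tok : List Char) :
    (l.foldl (fun d i => d.insert (pvKey i) (pvKey (i + 1))) PySem.Dict.empty).get? tok
      = (l.reverse.find? (fun i => pvKey i == tok)).map (fun i => pvKey (i + 1)) := by
  induction l using List.reverseRecOn with
  | nil => simp [PySem.Dict.get?_empty]
  | append_singleton xs j ih =>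
    rw [List.foldl_append, List.foldl_cons, List.foldl_nil]
    rw [PySem.Dict.get?_insert]
    rw [List.reverse_append]
    simp only [List.reverse_cons, List.reverse_nil, List.nil_append, List.cons_append,
      List.find?_cons]
    by_cases h : tok = pvKey j
    · subst h
      simp
    · have : (pvKey j == tok) = false := by
        simp only [beq_eq_false_iff_ne, ne_eq]
        exact fun hh => h hh.symm
      rw [if_neg h, this, ih]

theorem pv_find?_unique (l : List Int) (k : Int) :
    l.find? (fun i => pvKey i == pvKey k) = if k ∈ l then some k else none := by
  induction l with
  | nil => simp
  | cons a as ih =>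
    rw [List.find?_cons]
    by_cases ha : a = k
    · subst ha
      simp
    · have : (pvKey a == pvKey k) = false := by
        simp only [beq_eq_false_iff_ne, ne_eq]
        exact fun hh => ha (pv_key_inj hh)
      rw [this, ih]
      have hka : ¬ k = a := fun h => ha h.symm
      simp [hka]

-- the per-token downward sweep of B
def pvSweep (a b : Int) (t : List Char) : List Char :=
  (PySem.List.pyRange a b (-1)).foldl (fun t i => if t = pvKey i then pvKey (i + 1) else t) t

theorem pv_sweep_no_match : ∀ (n : Nat) (a b : Int), (a - b).toNat = n →
    ∀ t : List Char, (∀ i, b < i → i ≤ a → t ≠ pvKey i) → pvSweep a b t = t := by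
  intro n
  induction n with
  | zero =>
    intro a b hn t _
    unfold pvSweep
    rw [PySem.List.pyRange_neg_one_eq_nil (by omega)]
    rfl
  | succ m ih =>
    intro a b hn t h
    unfold pvSweep
    rw [PySem.List.pyRange_neg_one_cons (by omega), List.foldl_cons]
    rw [if_neg (h a (by omega) (by omega))]
    exact ih (a - 1) b (by omega) t (fun i h1 h2 => h i h1 (by omega))

theorem pv_sweep_match : ∀ (n : Nat) (a b k : Int), (a - b).toNat = n →
    b < k → k ≤ a → pvSweep a b (pvKey k) = pvKey (k + 1) := by
  intro n
  induction n with
  | zero => intro a b k hn h1 h2; omega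
  | succ m ih =>
    intro a b k hn h1 h2
    unfold pvSweep
    rw [PySem.List.pyRange_neg_one_cons (by omega), List.foldl_cons]
    by_cases hk : k = a
    · subst hk
      rw [if_pos rfl]
      exact pv_sweep_no_match m (k - 1) b (by omega) (pvKey (k + 1))
        (fun i hi1 hi2 hEq => by have := pv_key_inj hEq; omega)
    · rw [if_neg (fun hEq => hk (pv_key_inj hEq))]
      exact ih (a - 1) b k (by omega) h1 (by omega)

-- B's outer fold of maps commutes into one map of per-token folds
theorem pv_foldl_map_comm (g : Int → List Char → List Char) :
    ∀ (l : List Int) (ts : List (List Char)),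
    l.foldl (fun ts i => ts.map (g i)) ts = ts.map (fun t => l.foldl (fun t i => g i t) t) := by
  intro l
  induction l with
  | nil => intro ts; simp
  | cons i l ih =>
    intro ts
    rw [List.foldl_cons, ih, List.map_map]
    rfl

-- A's per-token dict lookup equals B's per-token downward sweep
theorem pv_tok_eq (start_idx end_idx : Int) (tok : List Char) :
    (if (pvMapA start_idx end_idx).contains tok
      then (pvMapA start_idx end_idx).getD tok [] else tok)
      = pvSweep end_idx (start_idx - 1) tok := by
  have hget := pv_map_get? (PySem.List.pyRange start_idx (end_idx + 1) 1) tok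
  rw [PySem.Dict.contains_eq_isSome_get?, PySem.Dict.getD_eq_get?_getD]
  show (if ((pvMapA start_idx end_idx).get? tok).isSome = true then _ else tok) = _
  by_cases h : ∃ k, tok = pvKey k
  · obtain ⟨k, rfl⟩ := h
    have hfind : (PySem.List.pyRange start_idx (end_idx + 1) 1).reverse.find?
        (fun i => pvKey i == pvKey k)
        = if k ∈ PySem.List.pyRange start_idx (end_idx + 1) 1 then some k else none := by
      rw [pv_find?_unique]
      simp
    rw [pvMapA] at *
    rw [hget, hfind]
    by_cases hin : k ∈ PySem.List.pyRange start_idx (end_idx + 1) 1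
    · have hrange : start_idx ≤ k ∧ k ≤ end_idx := by
        have := PySem.List.mem_pyRange_one.mp hin
        omega
      rw [if_pos hin]
      simp only [Option.map_some, Option.isSome_some, if_true, Option.getD_some]
      exact (pv_sweep_match (end_idx - (start_idx - 1)).toNat end_idx (start_idx - 1) k rfl
        (by omega) (by omega)).symm
    · have hrange : ¬ (start_idx ≤ k ∧ k ≤ end_idx) := by
        intro hc
        exact hin (PySem.List.mem_pyRange_one.mpr ⟨hc.1, by omega⟩)
      rw [if_neg hin]
      simp only [Option.map_none, Option.isSome_none, Bool.false_eq_true, if_false]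
      exact (pv_sweep_no_match (end_idx - (start_idx - 1)).toNat end_idx (start_idx - 1) rfl
        (pvKey k) (fun i h1 h2 hEq => by have := pv_key_inj hEq; omega)).symm
  · have hfind : (PySem.List.pyRange start_idx (end_idx + 1) 1).reverse.find?
        (fun i => pvKey i == tok) = none := by
      rw [List.find?_eq_none]
      intro i _ hi
      exact h ⟨i, (by simpa using hi : pvKey i = tok).symm⟩
    rw [pvMapA] at *
    rw [hget, hfind]
    simp only [Option.map_none, Option.isSome_none, Bool.false_eq_true, if_false]
    exact (pv_sweep_no_match (end_idx - (start_idx - 1)).toNat end_idx (start_idx - 1) rfl tok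
      (fun i _ _ hEq => h ⟨i, hEq⟩)).symm

def pvGood (w : List Char) : Prop := w ≠ [] ∧ ∀ c ∈ w, PySem.Chars.isspace c = false

theorem pv_split₀_go_good (s : List Char) : ∀ cur acc,
    (∀ c ∈ cur, PySem.Chars.isspace c = false) →
    (∀ t ∈ acc, pvGood t) →
    ∀ t ∈ PySem.Chars.split₀.go s cur acc, pvGood t := by
  induction s with
  | nil =>
    intro cur acc hcur hacc t ht
    rw [PySem.Chars.split₀.go] at ht
    split_ifs at ht with h
    · exact hacc t (by simpa using ht)
    · rw [List.mem_reverse, List.mem_cons] at ht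
      rcases ht with h' | h'
      · subst h'
        refine ⟨by simpa [List.isEmpty_iff] using h, fun c hc => hcur c (by simpa using hc)⟩
      · exact hacc t (by simpa using h')
  | cons c rest ih =>
    intro cur acc hcur hacc t ht
    rw [PySem.Chars.split₀.go] at ht
    split_ifs at ht with h1 h2
    · exact ih [] acc (by simp) hacc t ht
    · refine ih [] _ (by simp) ?_ t ht
      intro u hu
      rcases List.mem_cons.mp hu with h' | h'
      · subst h'
        exact ⟨by simpa [List.isEmpty_iff] using h2, fun x hx => hcur x (by simpa using hx)⟩
      · exact hacc u h'
    · refine ih (c :: cur) acc ?_ hacc t ht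
      intro x hx
      rcases List.mem_cons.mp hx with h' | h'
      · subst h'; simpa using h1
      · exact hcur x h'

theorem pv_split₀_good (s : List Char) : ∀ t ∈ PySem.Chars.split₀ s, pvGood t := by
  rw [PySem.Chars.split₀]
  exact pv_split₀_go_good s [] [] (by simp) (by simp)

theorem pv_digit_not_space (c : Char) (h : '0' ≤ c ∧ c ≤ '9') :
    PySem.Chars.isspace c = false := by
  have h1 : 48 ≤ c.toNat := by simpa [Char.le_def] using h.1
  have h2 : c.toNat ≤ 57 := by simpa [Char.le_def] using h.2
  simp only [PySem.Chars.isspace, Bool.or_eq_false_iff, Bool.and_eq_false_iff,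
    decide_eq_false_iff_not]
  omega

theorem pv_key_good (k : Int) : pvGood (pvKey k) := by
  constructor
  · simp [pvKey]
  · intro c hc
    rw [pvKey] at hc
    rcases List.mem_cons.mp hc with h' | h'
    · subst h'; decide
    · rw [PySem.Int.toChars] at h'
      split_ifs at h' with hk
      · rcases List.mem_cons.mp h' with h'' | h''
        · subst h''; decide
        · exact pv_digit_not_space _ (pv_toDigits_digits _ _ h'')
      · exact pv_digit_not_space _ (pv_toDigits_digits _ _ h')

theorem pv_sweep_good (a b : Int) (tok : List Char) (h : pvGood tok) :
    pvGood (pvSweep a b tok) := by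
  unfold pvSweep
  induction PySem.List.pyRange a b (-1) generalizing tok with
  | nil => exact h
  | cons i l ih =>
    rw [List.foldl_cons]
    by_cases hi : tok = pvKey i
    · rw [if_pos hi]
      exact ih _ (pv_key_good (i + 1))
    · rw [if_neg hi]
      exact ih _ h

theorem pv_dropWhile_nonspace (w rest : List Char) (hne : w ≠ [])
    (hw : ∀ c ∈ w, PySem.Chars.isspace c = false) :
    (w ++ rest).dropWhile PySem.Chars.isspace = w ++ rest := by
  obtain ⟨c, cs, rfl⟩ := List.exists_cons_of_ne_nil hne
  rw [List.cons_append, List.dropWhile_cons_of_neg (by simp [hw c (by simp)])]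

theorem pv_rstrip_append (w tail : List Char) :
    PySem.Chars.rstrip (w ++ tail)
      = if PySem.Chars.rstrip tail = [] then PySem.Chars.rstrip w
        else w ++ PySem.Chars.rstrip tail := by
  unfold PySem.Chars.rstrip
  rw [List.reverse_append, List.dropWhile_append]
  by_cases h : (tail.reverse.dropWhile PySem.Chars.isspace) = []
  · rw [if_pos (by simp [h]), if_pos (by simp [h])]
  · rw [if_neg (by simp [h]), if_neg (by simp [h])]
    rw [List.reverse_append, List.reverse_reverse]

theorem pv_rstrip_of_good (w : List Char) (h : pvGood w) :
    PySem.Chars.rstrip w = w := by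
  unfold PySem.Chars.rstrip
  have : w.reverse.dropWhile PySem.Chars.isspace = w.reverse ++ [] := by
    rw [List.append_nil]
    have := pv_dropWhile_nonspace w.reverse [] (by simp [h.1])
      (fun c hc => h.2 c (List.mem_reverse.mp hc))
    simpa using this
  rw [this]
  simp

theorem pv_intercalate_cons (w : List Char) (ws : List (List Char)) (h : ws ≠ []) :
    List.intercalate [' '] (w :: ws) = w ++ [' '] ++ List.intercalate [' '] ws := by
  obtain ⟨x, xs, rfl⟩ := List.exists_cons_of_ne_nil h
  simp [List.intercalate]

theorem pv_rstrip_sp_flat (ws : List (List Char)) (h : ∀ w ∈ ws, pvGood w) :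
    PySem.Chars.rstrip (' ' :: ws.flatMap (fun w => w ++ [' ']))
      = if ws = [] then [] else ' ' :: List.intercalate [' '] ws := by
  induction ws with
  | nil => simp; decide
  | cons w ws ih =>
    have hgw := h w (by simp)
    have hws : ∀ u ∈ ws, pvGood u := fun u hu => h u (by simp [hu])
    have key : (' ' :: (w :: ws).flatMap (fun w => w ++ [' ']))
        = (' ' :: w) ++ (' ' :: ws.flatMap (fun w => w ++ [' '])) := by
      simp
    rw [key, pv_rstrip_append, ih hws]
    by_cases hnil : ws = []
    · rw [if_pos (by simp [hnil])]
      subst hnil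
      have hsp : PySem.Chars.rstrip (' ' :: w) = ' ' :: w := by
        have h0 : (' ' :: w) = [' '] ++ w := rfl
        rw [h0, pv_rstrip_append]
        rw [if_neg (by rw [pv_rstrip_of_good w hgw]; exact hgw.1), pv_rstrip_of_good w hgw]
      rw [hsp, if_neg (by simp)]
      simp [List.intercalate]
    · rw [if_neg (by simp [hnil]), if_neg hnil]
      rw [pv_intercalate_cons w ws hnil]
      simp

theorem pv_strip_flat (ws : List (List Char)) (h : ∀ w ∈ ws, pvGood w) :
    PySem.Chars.strip (ws.flatMap (fun w => w ++ [' '])) = List.intercalate [' '] ws := by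
  unfold PySem.Chars.strip
  cases ws with
  | nil => decide
  | cons w ws =>
    have hgw := h w (by simp)
    have hws : ∀ u ∈ ws, pvGood u := fun u hu => h u (by simp [hu])
    have hflat : (w :: ws).flatMap (fun w => w ++ [' '])
        = w ++ (' ' :: ws.flatMap (fun w => w ++ [' '])) := by simp
    rw [hflat]
    rw [PySem.Chars.lstrip, pv_dropWhile_nonspace w _ hgw.1 hgw.2]
    rw [pv_rstrip_append, pv_rstrip_sp_flat ws hws]
    by_cases hnil : ws = []
    · rw [if_pos (by simp [hnil]), pv_rstrip_of_good w hgw, hnil]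
      simp [List.intercalate]
    · rw [if_neg (by simp [hnil]), if_neg hnil, pv_intercalate_cons w ws hnil]
      simp

theorem pv_main (q : String) (s e : Int) : refs_one_up q s e = refs_one_up_alt q s e := by
  unfold refs_one_up refs_one_up_alt
  dsimp only
  have hfun : (fun (acc tok : List Char) =>
      if (pvMapA s e).contains tok then acc ++ (pvMapA s e).getD tok [] ++ [' ']
      else acc ++ tok ++ [' '])
      = (fun acc tok => acc ++ (pvSweep e (s - 1) tok ++ [' '])) := by
    funext acc tok
    have hpush : (if (pvMapA s e).contains tok then acc ++ (pvMapA s e).getD tok [] ++ [' ']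
        else acc ++ tok ++ [' '])
        = acc ++ ((if (pvMapA s e).contains tok then (pvMapA s e).getD tok [] else tok) ++ [' ']) := by
      split_ifs <;> simp
    rw [hpush, pv_tok_eq]
  rw [hfun]
  rw [PySem.List.foldl_append_eq_flatMap (fun tok => pvSweep e (s - 1) tok ++ [' '])]
  rw [List.nil_append]
  rw [pv_foldl_map_comm (fun i t => if t = pvKey i then pvKey (i + 1) else t)]
  have hflat : (PySem.Chars.split₀ q.toList).flatMap (fun tok => pvSweep e (s - 1) tok ++ [' '])
      = ((PySem.Chars.split₀ q.toList).map (pvSweep e (s - 1))).flatMap (fun w => w ++ [' ']) := by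
    rw [List.flatMap_map]
  rw [hflat]
  rw [pv_strip_flat]
  · rfl
  · intro w hw
    obtain ⟨t, ht, rfl⟩ := List.mem_map.mp hw
    exact pv_sweep_good e (s - 1) t (pv_split₀_good _ t ht)

-- ===== VERDICT (by name: the statement is the Claim_ definition above) =====
theorem refs_one_up_spec : Claim_equal_refs_one_up := by
  intro qdmr_text start_idx end_idx _
  unfold Spec_refs_one_up
  exact pv_main qdmr_text start_idx end_idx
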